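-- pv_equiv track=rewrite | github.com/pypi-data/pypi-mirror-392 | packages/yirifi-dq/yirifi_dq-1.0.0.tar.gz/yirifi_dq-1.0.0/yirifi_dq/core/generators/slugs.py | _is_valid_slug
-- ===== SOURCE A (Python) =====
-- def _is_valid_slug(slug: str) -> bool:
--     """
--     Validate slug format.
--
--     Args:
--         slug: Slug to validate
--
--     Returns:
--         True if valid, False otherwise
--     """
--     if not slug:
--         return False
--
--     # Check length (strict max: 70 characters)
--     if len(slug) > 70:
--         return False
--
--     # Check characters (lowercase alphanumeric + hyphens)
--     allowed_chars = set("abcdefghijklmnopqrstuvwxyz0123456789-")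
--     if not all(c in allowed_chars for c in slug):
--         return False
--
--     # Check for consecutive hyphens
--     if "--" in slug:
--         return False
--
--     # Check start/end
--     return not (slug.startswith("-") or slug.endswith("-"))
-- ===== SOURCE B (Python) =====
-- def _is_valid_slug(slug: str) -> bool:
--     """One-pass state-machine validation (tracks previous char) instead of four separate scans."""
--     if not (1 <= len(slug) <= 70):
--         return False
--     prev = "-"
--     for c in slug:
--         if not ("a" <= c <= "z" or "0" <= c <= "9" or c == "-"):
--             return False
--         if c == "-" and prev == "-":
--             return False
--         prev = c
--     return prev != "-"
-- ===== Notes on version B (the rewrite author's own statement) =====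
-- stated objective: alternative
-- what changed: Replaces A's four separate scans (set-membership pass, '--' substring search, startswith/endswith checks) by a single left-to-right pass that tracks the previous character as a tiny state machine.
import Mathlib
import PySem

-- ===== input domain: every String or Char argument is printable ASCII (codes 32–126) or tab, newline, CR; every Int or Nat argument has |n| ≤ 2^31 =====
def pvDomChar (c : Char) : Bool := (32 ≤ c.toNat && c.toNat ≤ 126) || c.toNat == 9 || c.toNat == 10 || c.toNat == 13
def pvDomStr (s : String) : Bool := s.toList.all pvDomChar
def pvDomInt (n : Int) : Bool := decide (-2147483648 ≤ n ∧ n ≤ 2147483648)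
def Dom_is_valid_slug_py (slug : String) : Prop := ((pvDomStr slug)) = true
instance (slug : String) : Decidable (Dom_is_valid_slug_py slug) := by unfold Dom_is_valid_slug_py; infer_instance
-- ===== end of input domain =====

-- B replaces A's four separate scans by one left-to-right pass tracking the previous character (alternative decomposition, same cost).

-- ===== PORT A =====
def pvAllowedChars : PySem.Set Char :=
  PySem.Set.ofList "abcdefghijklmnopqrstuvwxyz0123456789-".toList

def is_valid_slug_py (slug : String) : Bool :=
  if PySem.Str.len slug == 0 then false
  else if 70 < PySem.Str.len slug then false
  else if !(slug.toList.all (fun c => PySem.Set.contains pvAllowedChars c)) then false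
  else if PySem.Str.isIn "--" slug then false
  else !(PySem.Str.startswith slug "-" || PySem.Str.endswith slug "-")

-- ===== PORT B =====
def pvAltGo : Char → List Char → Bool
  | prev, [] => prev != '-'
  | prev, c :: rest =>
    if !(decide ('a' ≤ c) && decide (c ≤ 'z') || decide ('0' ≤ c) && decide (c ≤ '9') || c == '-') then false
    else if c == '-' && prev == '-' then false
    else pvAltGo c rest

def is_valid_slug_py_alt (slug : String) : Bool :=
  if !(1 ≤ slug.toList.length && slug.toList.length ≤ 70) then false
  else pvAltGo '-' slug.toList

-- ===== PRECONDITION & SPEC =====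
def Spec_is_valid_slug_py (slug : String) (out : Bool) : Prop := out = is_valid_slug_py_alt slug
instance (slug : String) (out : Bool) : Decidable (Spec_is_valid_slug_py slug out) := by unfold Spec_is_valid_slug_py; infer_instance

-- ===== CLAIM (what is proved, stated in full; the proofs are below) =====
def Claim_equal_is_valid_slug_py : Prop := ∀ (slug : String), Dom_is_valid_slug_py slug → Spec_is_valid_slug_py slug (is_valid_slug_py slug)

-- ===== LEMMAS AND PROOFS =====

-- A's set membership agrees with B's range comparisons, for every Char.
lemma allowed_eq_ranges (c : Char) :
    PySem.Set.contains pvAllowedChars c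
      = (decide ('a' ≤ c) && decide (c ≤ 'z') || decide ('0' ≤ c) && decide (c ≤ '9') || c == '-') := by
  rw [Bool.eq_iff_iff]
  have hmem : PySem.Set.contains pvAllowedChars c = true ↔
      c ∈ ("abcdefghijklmnopqrstuvwxyz0123456789-".toList) := by
    rw [PySem.Set.contains_iff]; exact PySem.Set.mem_ofList ..
  rw [hmem]
  simp [List.mem_cons, Char.le_def, Char.ext_iff, UInt32.le_iff_toNat_le, ← UInt32.toNat_inj]
  omega

-- B's loop, characterised: all chars allowed, no "--" inside prev::l, and prev::l does not end in '-'.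
lemma pvAltGo_iff (l : List Char) (prev : Char) :
    pvAltGo prev l = true ↔
      (∀ c ∈ l, (decide ('a' ≤ c) && decide (c ≤ 'z') || decide ('0' ≤ c) && decide (c ≤ '9') || c == '-') = true)
        ∧ ¬ (['-','-'] <:+: prev :: l) ∧ ¬ (['-'] <:+ prev :: l) := by
  induction l generalizing prev with
  | nil =>
    simp [pvAltGo, List.suffix_cons_iff, List.infix_cons_iff, List.cons_prefix_cons]
    exact not_congr eq_comm
  | cons c rest ih =>
    rw [pvAltGo]
    by_cases hok : (decide ('a' ≤ c) && decide (c ≤ 'z') || decide ('0' ≤ c) && decide (c ≤ '9') || c == '-') = true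
    · simp only [hok, Bool.not_true, if_false, Bool.false_eq_true]
      by_cases hdd : c = '-' ∧ prev = '-'
      · simp [hdd.1, hdd.2, List.infix_cons_iff, List.cons_prefix_cons]
      · have hcond : (c == '-' && prev == '-') = false := by
          simp only [Bool.and_eq_false_iff, beq_eq_false_iff_ne]; tauto
        rw [hcond, if_neg (by simp), ih]
        have hinf : (['-','-'] <:+: prev :: c :: rest) ↔ (['-','-'] <:+: c :: rest) := by
          rw [List.infix_cons_iff]
          simp only [List.cons_prefix_cons]
          constructor
          · rintro (⟨h1, h2, -⟩ | h) <;> [exact absurd ⟨h2.symm, h1.symm⟩ hdd; exact h]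
          · exact Or.inr
        have hsuf : (['-'] <:+ prev :: c :: rest) ↔ (['-'] <:+ c :: rest) := by
          rw [List.suffix_cons_iff]
          constructor
          · rintro (h | h)
            · exact absurd (congrArg List.length h) (by simp)
            · exact h
          · exact Or.inr
        rw [hinf, hsuf]
        simp only [List.mem_cons, forall_eq_or_imp, hok, true_and]
    · simp only [hok, Bool.not_false, if_true, Bool.false_eq_true, false_iff]
      rintro ⟨hall, -, -⟩
      exact hok (hall c (List.mem_cons_self ..))

-- ===== VERDICT (by name: the statement is the Claim_ definition above) =====
theorem is_valid_slug_py_spec : Claim_equal_is_valid_slug_py := by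
  intro slug _
  unfold Spec_is_valid_slug_py is_valid_slug_py is_valid_slug_py_alt
  by_cases h0 : slug.length = 0
  · simp [h0, String.length_toList]
  · by_cases h70 : 70 < slug.length
    · simp [h70, String.length_toList]
    · have hguards : (1 ≤ slug.toList.length && slug.toList.length ≤ 70) = true := by
        simp [String.length_toList]; omega
      rw [hguards]
      simp only [Bool.not_true, Bool.false_eq_true, if_false]
      have hne : slug.toList ≠ [] := by
        intro h
        exact h0 (by rw [← String.length_toList, h]; rfl)
      have hA0 : ¬ ((PySem.Str.len slug == 0) = true) := by
        simp [String.length_toList]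
        exact fun he => h0 (by rw [he]; rfl)
      have hA70 : ¬ ((70 : Int) < PySem.Str.len slug) := by
        simp [String.length_toList]; omega
      rw [if_neg hA0, if_neg hA70]
      rw [Bool.eq_iff_iff]
      rw [pvAltGo_iff slug.toList '-']
      have htl2 : ("--" : String).toList = ['-','-'] := rfl
      have htl1 : ("-" : String).toList = ['-'] := rfl
      have hstart : PySem.Str.startswith slug "-" = true ↔ ['-'] <+: slug.toList := by
        simp only [PySem.Str.startswith_eq, PySem.Chars.startswith_iff, htl1]
      have hend : PySem.Str.endswith slug "-" = true ↔ ['-'] <:+ slug.toList := by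
        simp only [PySem.Str.endswith_eq, PySem.Chars.endswith_iff, htl1]
      have hin : PySem.Str.isIn "--" slug = true ↔ ['-','-'] <:+: slug.toList := by
        rw [PySem.Str.isIn_iff_infix, htl2]
      have hall : (slug.toList.all fun c => pvAllowedChars.contains c) = true ↔
          ∀ c ∈ slug.toList,
            (decide ('a' ≤ c) && decide (c ≤ 'z') || decide ('0' ≤ c) && decide (c ≤ '9') || c == '-') = true := by
        simp only [List.all_eq_true, allowed_eq_ranges]
      have hdd : (['-', '-'] <:+: '-' :: slug.toList) ↔ (['-'] <+: slug.toList ∨ ['-','-'] <:+: slug.toList) := by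
        rw [List.infix_cons_iff, List.cons_prefix_cons]
        constructor
        · rintro (⟨-, h⟩ | h)
          · exact Or.inl h
          · exact Or.inr h
        · rintro (h | h)
          · exact Or.inl ⟨rfl, h⟩
          · exact Or.inr h
      have hsng : (['-'] <:+ '-' :: slug.toList) ↔ (['-'] <:+ slug.toList) := by
        rw [List.suffix_cons_iff]
        constructor
        · rintro (h | h)
          · injection h with h1 h2
            exact absurd h2.symm hne
          · exact h
        · exact Or.inr
      rw [hdd, hsng]
      constructor
      · intro hA
        by_cases ha : (slug.toList.all fun c => pvAllowedChars.contains c) = true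
        case neg =>
          have ha' := Bool.eq_false_iff.mpr ha
          rw [if_pos (by rw [ha']; rfl)] at hA; cases hA
        rw [if_neg (by rw [ha]; decide)] at hA
        by_cases hi : PySem.Str.isIn "--" slug = true
        · rw [if_pos hi] at hA; cases hA
        rw [if_neg hi] at hA
        simp only [Bool.not_eq_true', Bool.or_eq_false_iff] at hA
        refine ⟨hall.mp ha, ?_, ?_⟩
        · rintro (hp | hd2)
          · rw [hstart.mpr hp] at hA
            exact absurd hA.1 (by simp)
          · exact hi (hin.mpr hd2)
        · intro hs
          rw [hend.mpr hs] at hA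
          exact absurd hA.2 (by simp)
      · rintro ⟨h1, h2, h3⟩
        rw [if_neg (by simp only [hall.mpr h1, Bool.not_true]; exact Bool.false_ne_true), if_neg (fun hi2 => h2 (Or.inr (hin.mp hi2)))]
        simp only [Bool.not_eq_true', Bool.or_eq_false_iff]
        constructor
        · cases hst : PySem.Str.startswith slug "-"
          · rfl
          · exact absurd (Or.inl (hstart.mp hst)) h2
        · cases hen : PySem.Str.endswith slug "-"
          · rfl
          · exact absurd (hend.mp hen) h3
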